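-- pv_equiv track=rewrite | github.com/TermiDD81/utm-mapping | utm_mapping.py | determine_supplier
-- ===== SOURCE A (Python) =====
-- free_patterns = {
--         "pp": "pp",
--         "pesok": "Песок",
--         "ndzokt5": "pp",
--         "perezakokt4": "pp",
--         "replay": "Replay",
--         "replаy": "Replay",
--         "dubl": "Дубли",
--         "dblvrn": "Двойная воронка",
--         "otval": "Отвал",
--         "mod": "pp",
--         "dlsbp": "pp"
--         }
--
-- priority_rules = [
--         ("dmp", "ДМП"),
--         ("dmpone", "ДМП"),
--         ("dmpnew", "ДМП"),
--         ("wr", "ВР"),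
--         ("rt", "Ростелеком"),
--         ("t2", "Теле2"),
--         ("lagom", "Игорь"),
--         ("kokos", "Кокос"),
--         ("vk", "ВКонтакте"),
--         ("robot", "Robot_maks"),
--         ("datacall", "Datacall"),
--         ("alex", "Alex"),
--         ("avito", "Avito"),
--         ("reffection", "Рефекшн кинетик"),
--         ("yandex", "Яндекс"),
--         ("mk", "Яндекс"),
--         ("spam", "Яндекс"),
--         ("tg", "Telegram"),
--         ("knowhow", "Ноухау"),
--         ("khownow", "Ноухау"),
--         ("voip", "gn_voip"),
--         ("smstraf", "СМСтраф"),
--         ("karl", "Карл"),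
--         ("andr", "Андрей"),
--         ("botto", "Botto"),
--         ("rasim", "Rasim"),
--         ("scoring", "Скоринг"),
--         ("bs", "Скоринг"),
--         ("beeline", "Скоринг"),
--         ("ipoteka", "Тест"),
--         ("kirill", "Кирилл"),
--         ("ngslb", "Нэтгроуслаб"),
--         ("naumen", "Наумен"),
--         ("robovoice", "Робовойс"),
--     ]
--
-- def determine_supplier(parts):
--     """
--     Обрабатывает фрагменты метки, сначала проверяя на бесплатного поставщика в конце метки. Если находится бесплатный поставщик, функция завершается.
--     Если метка не от бесплатного поставщика, то определяется платный. Поставщик назначается по первому фрагменту, который соответствует признаку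
--     """
--     # Проверяем, есть ли последний элемент в списке бесплатных поставщиков
--     last_part = parts[-1] if parts else ""
--     if last_part in free_patterns:
--         return free_patterns[last_part]
--
--     # Словарь для хранения позиций найденных паттернов
--     matches = {}
--
--     # Перебираем элементы метки и ищем точные совпадения
--     for i, part in enumerate(parts):
--         for pattern, supplier in priority_rules:
--             if part == pattern:  # Строгое соответствие
--                 # Если совпадение уже найдено, берем более раннюю позицию
--                 if supplier not in matches or matches[supplier] > i:
--                     matches[supplier] = i
--
--     # Если есть совпадения, возвращаем поставщика с минимальной позицией
--     if matches:
--         return min(matches, key=matches.get)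
--
--     # Если совпадений нет
--     return "Неизвестно"
-- ===== SOURCE B (Python) =====
-- # B: inverse grouped tables (supplier -> its patterns) scanned by a generic
-- # first-match lookup, with an early-exit pass over parts.
-- _free_groups = [
--     ("pp", ("pp", "ndzokt5", "perezakokt4", "mod", "dlsbp")),
--     ("Песок", ("pesok",)),
--     ("Replay", ("replay", "replаy")),
--     ("Дубли", ("dubl",)),
--     ("Двойная воронка", ("dblvrn",)),
--     ("Отвал", ("otval",)),
-- ]
--
-- _paid_groups = [
--     ("ДМП", ("dmp", "dmpone", "dmpnew")),
--     ("ВР", ("wr",)),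
--     ("Ростелеком", ("rt",)),
--     ("Теле2", ("t2",)),
--     ("Игорь", ("lagom",)),
--     ("Кокос", ("kokos",)),
--     ("ВКонтакте", ("vk",)),
--     ("Robot_maks", ("robot",)),
--     ("Datacall", ("datacall",)),
--     ("Alex", ("alex",)),
--     ("Avito", ("avito",)),
--     ("Рефекшн кинетик", ("reffection",)),
--     ("Яндекс", ("yandex", "mk", "spam")),
--     ("Telegram", ("tg",)),
--     ("Ноухау", ("knowhow", "khownow")),
--     ("gn_voip", ("voip",)),
--     ("СМСтраф", ("smstraf",)),
--     ("Карл", ("karl",)),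
--     ("Андрей", ("andr",)),
--     ("Botto", ("botto",)),
--     ("Rasim", ("rasim",)),
--     ("Скоринг", ("scoring", "bs", "beeline")),
--     ("Тест", ("ipoteka",)),
--     ("Кирилл", ("kirill",)),
--     ("Нэтгроуслаб", ("ngslb",)),
--     ("Наумен", ("naumen",)),
--     ("Робовойс", ("robovoice",)),
-- ]
--
-- def _group_lookup(groups, part):
--     for supplier, patterns in groups:
--         if part in patterns:
--             return supplier
--     return None
--
-- def determine_supplier(parts):
--     free = _group_lookup(_free_groups, parts[-1] if parts else "")
--     if free is not None:
--         return free
--     for part in parts: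
--         supplier = _group_lookup(_paid_groups, part)
--         if supplier is not None:
--             return supplier
--     return "Неизвестно"
-- ===== Notes on version B (the rewrite author's own statement) =====
-- stated objective: alternative
-- what changed: B replaces A's build-a-positions-dict-then-min(key=position) decomposition by an inverse supplier->patterns grouped table queried through a generic first-match lookup helper, scanning parts once with early exit on the first matching part.
import Mathlib
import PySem

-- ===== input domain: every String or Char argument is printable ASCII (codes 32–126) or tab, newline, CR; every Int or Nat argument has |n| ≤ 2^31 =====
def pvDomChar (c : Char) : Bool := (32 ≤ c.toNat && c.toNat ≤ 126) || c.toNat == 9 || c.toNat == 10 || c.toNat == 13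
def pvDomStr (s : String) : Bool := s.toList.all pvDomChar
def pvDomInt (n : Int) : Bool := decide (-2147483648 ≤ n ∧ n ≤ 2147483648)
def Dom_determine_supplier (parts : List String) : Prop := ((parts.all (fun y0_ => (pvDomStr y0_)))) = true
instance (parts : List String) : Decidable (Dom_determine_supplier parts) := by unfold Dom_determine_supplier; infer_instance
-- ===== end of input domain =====

-- B replaces A's build-all-matches-dict-then-min(key=position) decomposition by an
-- inverse supplier→patterns grouped table with a generic first-match lookup and an
-- early-exit scan over parts (objective: alternative).

-- ===== PORT A =====
-- module-level data of A: free_patterns dict and priority_rules list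
def pvFree : PySem.Dict String String := PySem.Dict.ofList [
  ("pp", "pp"), ("pesok", "Песок"), ("ndzokt5", "pp"), ("perezakokt4", "pp"),
  ("replay", "Replay"), ("replаy", "Replay"), ("dubl", "Дубли"),
  ("dblvrn", "Двойная воронка"), ("otval", "Отвал"), ("mod", "pp"), ("dlsbp", "pp")]

def pvRules : List (String × String) := [
  ("dmp", "ДМП"), ("dmpone", "ДМП"), ("dmpnew", "ДМП"), ("wr", "ВР"),
  ("rt", "Ростелеком"), ("t2", "Теле2"), ("lagom", "Игорь"), ("kokos", "Кокос"),
  ("vk", "ВКонтакте"), ("robot", "Robot_maks"), ("datacall", "Datacall"),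
  ("alex", "Alex"), ("avito", "Avito"), ("reffection", "Рефекшн кинетик"),
  ("yandex", "Яндекс"), ("mk", "Яндекс"), ("spam", "Яндекс"), ("tg", "Telegram"),
  ("knowhow", "Ноухау"), ("khownow", "Ноухау"), ("voip", "gn_voip"),
  ("smstraf", "СМСтраф"), ("karl", "Карл"), ("andr", "Андрей"), ("botto", "Botto"),
  ("rasim", "Rasim"), ("scoring", "Скоринг"), ("bs", "Скоринг"),
  ("beeline", "Скоринг"), ("ipoteka", "Тест"), ("kirill", "Кирилл"),
  ("ngslb", "Нэтгроуслаб"), ("naumen", "Наумен"), ("robovoice", "Робовойс")]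

-- A's inner 'for pattern, supplier in priority_rules' loop over one (i, part)
def pvInner (m : PySem.Dict String Int) (i : Int) (part : String) : PySem.Dict String Int :=
  pvRules.foldl (fun m r =>
    if part == r.1 then
      (if !m.contains r.2 || decide (m.getD r.2 0 > i) then m.insert r.2 i else m)
    else m) m

-- A's final 'if matches: return min(matches, key=matches.get)' / 'return "Неизвестно"'
def pvFinish (m : PySem.Dict String Int) : String :=
  match PySem.List.min? m.keys (fun k => m.getD k 0) with
  | some s => s
  | none => "Неизвестно"

def determine_supplier (parts : List String) : String :=
  let last_part := (parts.getLast?).getD ""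
  if pvFree.contains last_part then pvFree.getD last_part "" else
  pvFinish ((PySem.List.enumerate parts 0).foldl (fun m ip => pvInner m ip.1 ip.2)
    PySem.Dict.empty)

-- ===== PORT B =====
-- B's module-level grouped tables: supplier paired with all its patterns
def pvFreeGroups : List (String × List String) := [
  ("pp", ["pp", "ndzokt5", "perezakokt4", "mod", "dlsbp"]),
  ("Песок", ["pesok"]),
  ("Replay", ["replay", "replаy"]),
  ("Дубли", ["dubl"]),
  ("Двойная воронка", ["dblvrn"]),
  ("Отвал", ["otval"])]

def pvPaidGroups : List (String × List String) := [
  ("ДМП", ["dmp", "dmpone", "dmpnew"]),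
  ("ВР", ["wr"]),
  ("Ростелеком", ["rt"]),
  ("Теле2", ["t2"]),
  ("Игорь", ["lagom"]),
  ("Кокос", ["kokos"]),
  ("ВКонтакте", ["vk"]),
  ("Robot_maks", ["robot"]),
  ("Datacall", ["datacall"]),
  ("Alex", ["alex"]),
  ("Avito", ["avito"]),
  ("Рефекшн кинетик", ["reffection"]),
  ("Яндекс", ["yandex", "mk", "spam"]),
  ("Telegram", ["tg"]),
  ("Ноухау", ["knowhow", "khownow"]),
  ("gn_voip", ["voip"]),
  ("СМСтраф", ["smstraf"]),
  ("Карл", ["karl"]),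
  ("Андрей", ["andr"]),
  ("Botto", ["botto"]),
  ("Rasim", ["rasim"]),
  ("Скоринг", ["scoring", "bs", "beeline"]),
  ("Тест", ["ipoteka"]),
  ("Кирилл", ["kirill"]),
  ("Нэтгроуслаб", ["ngslb"]),
  ("Наумен", ["naumen"]),
  ("Робовойс", ["robovoice"])]

-- B's '_group_lookup': first group whose pattern tuple contains the part
def pvGroupLookup : List (String × List String) → String → Option String
  | [], _ => none
  | g :: rest, part => if part ∈ g.2 then some g.1 else pvGroupLookup rest part

def determine_supplier_alt (parts : List String) : String :=
  match pvGroupLookup pvFreeGroups ((parts.getLast?).getD "") with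
  | some free => free
  | none =>
    match parts.findSome? (fun part => pvGroupLookup pvPaidGroups part) with
    | some supplier => supplier
    | none => "Неизвестно"

-- ===== PRECONDITION & SPEC =====
def Spec_determine_supplier (parts : List String) (out : String) : Prop := out = determine_supplier_alt parts
instance (parts : List String) (out : String) : Decidable (Spec_determine_supplier parts out) := by unfold Spec_determine_supplier; infer_instance

-- ===== CLAIM (what is proved, stated in full; the proofs are below) =====
def Claim_equal_determine_supplier : Prop := ∀ (parts : List String), Dom_determine_supplier parts → Spec_determine_supplier parts (determine_supplier parts)

-- ===== LEMMAS AND PROOFS =====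

-- proof-side view of A's rule table as a first-match dict, and of its whole loop
-- as an early-exit scan (pvScan), reused from both sides' characterisations
def pvTable : PySem.Dict String String := PySem.Dict.mk pvRules

def pvScan : List String → String
  | [] => "Неизвестно"
  | p :: rest => if pvTable.contains p then pvTable.getD p "" else pvScan rest

theorem pvTable_eq : pvTable = PySem.Dict.mk pvRules := rfl

-- loop invariant on A's matches dict after processing indices < j
def pvInv (m : PySem.Dict String Int) (j : Int) : Prop :=
  m.keys.Nodup ∧ m.items.Pairwise (fun a b => a.2 < b.2) ∧ ∀ q ∈ m.items, q.2 < j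

theorem pv_foldl_no_match (part : String) (i : Int) :
    ∀ (rules : List (String × String)) (m : PySem.Dict String Int),
    (∀ r ∈ rules, (part == r.1) = false) →
    rules.foldl (fun m r =>
      if part == r.1 then
        (if !m.contains r.2 || decide (m.getD r.2 0 > i) then m.insert r.2 i else m)
      else m) m = m := by
  intro rules
  induction rules with
  | nil => intro m _; rfl
  | cons r rest ih =>
      intro m h
      have hr := h r (List.mem_cons_self)
      simp only [List.foldl_cons, hr, if_false, Bool.false_eq_true]
      exact ih m (fun r' hr' => h r' (List.mem_cons_of_mem _ hr'))

theorem pvInner_char (m : PySem.Dict String Int) (i : Int) (part : String) :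
    pvInner m i part = match pvTable.get? part with
      | none => m
      | some s => if !m.contains s || decide (m.getD s 0 > i) then m.insert s i else m := by
  rw [pvTable_eq]
  have key : ∀ (rules : List (String × String)) (m : PySem.Dict String Int),
      (rules.map Prod.fst).Nodup →
      rules.foldl (fun m r =>
        if part == r.1 then
          (if !m.contains r.2 || decide (m.getD r.2 0 > i) then m.insert r.2 i else m)
        else m) m
      = match (PySem.Dict.mk rules).get? part with
        | none => m
        | some s => if !m.contains s || decide (m.getD s 0 > i) then m.insert s i else m := by
    intro rules
    induction rules with
    | nil => intro m _; rfl
    | cons r rest ih =>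
        intro m hnd
        rw [List.map_cons, List.nodup_cons] at hnd
        rw [PySem.Dict.get?_mk_cons]
        by_cases hpp : part = r.1
        · have h1 : (part == r.1) = true := by simp [hpp]
          have h2 : (r.1 == part) = true := by simp [hpp]
          simp only [List.foldl_cons, h1, h2, if_true]
          apply pv_foldl_no_match
          intro r' hr'
          subst hpp
          by_contra hc
          simp only [Bool.not_eq_false, beq_iff_eq] at hc
          exact hnd.1 (hc ▸ List.mem_map_of_mem hr')
        · have h1 : (part == r.1) = false := by simp [hpp]
          have h2 : (r.1 == part) = false := by simp [Ne.symm hpp]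
          simp only [List.foldl_cons, h1, h2, if_false, Bool.false_eq_true]
          exact ih m hnd.2
  exact key pvRules m (by decide)

theorem pvInner_inv (m : PySem.Dict String Int) (j : Int) (part : String)
    (h : pvInv m j) :
    pvInv (pvInner m j part) (j + 1) ∧
      (m.items ≠ [] → (pvInner m j part).items.head? = m.items.head?) := by
  obtain ⟨hnd, hpw, hlt⟩ := h
  have hstay : pvInv m (j + 1) :=
    ⟨hnd, hpw, fun q hq => lt_trans (hlt q hq) (by omega)⟩
  rw [pvInner_char]
  cases hq : pvTable.get? part with
  | none => exact ⟨hstay, fun _ => rfl⟩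
  | some s =>
      simp only []
      by_cases hc : m.contains s = true
      · have hsome : (m.get? s).isSome = true := by
          rw [← PySem.Dict.contains_eq_isSome_get?]; exact hc
        obtain ⟨v, hv⟩ := Option.isSome_iff_exists.mp hsome
        have hmem := PySem.Dict.mem_items_of_get?_eq_some m hv
        have hgd : m.getD s 0 = v := PySem.Dict.getD_of_get?_eq_some m 0 hv
        have hcond : (!m.contains s || decide (m.getD s 0 > j)) = false := by
          have := hlt _ hmem
          simp [hc, hgd]; omega
        rw [hcond]
        exact ⟨hstay, fun _ => rfl⟩
      · have hcf : m.contains s = false := by simpa using hc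
        have hcond : (!m.contains s || decide (m.getD s 0 > j)) = true := by simp [hcf]
        rw [hcond, if_pos rfl]
        have hitems : (m.insert s j).items = m.items ++ [(s, j)] :=
          PySem.Dict.items_insert_of_not_contains m j hcf
        refine ⟨⟨PySem.Dict.nodup_keys_insert _ _ _ hnd, ?_, ?_⟩, ?_⟩
        · rw [hitems, List.pairwise_append]
          exact ⟨hpw, List.pairwise_singleton _ _,
            fun a ha b hb => by simp at hb; subst hb; exact hlt a ha⟩
        · intro q hq'
          rw [hitems] at hq'
          rcases List.mem_append.mp hq' with h1 | h1
          · exact lt_trans (hlt q h1) (by omega)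
          · simp at h1; subst h1; omega
        · intro hne
          rw [hitems]
          cases hx : m.items with
          | nil => exact absurd hx hne
          | cons a t => simp

theorem pv_min_head (m : PySem.Dict String Int) (k : String) (v : Int)
    (t : List (String × Int)) (hn : m.keys.Nodup)
    (hp : m.items.Pairwise (fun a b => a.2 < b.2)) (hitems : m.items = (k, v) :: t) :
    PySem.List.min? m.keys (fun k' => m.getD k' 0) = some k := by
  have hkeys : m.keys = k :: t.map Prod.fst := by
    simp [PySem.Dict.keys, hitems]
  have hkmem : k ∈ m.keys := by rw [hkeys]; exact List.mem_cons_self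
  have hgk : m.getD k 0 = v :=
    PySem.Dict.getD_of_mem_items m (by rw [hitems]; exact List.mem_cons_self) hn 0
  have hvlt : ∀ q ∈ t, v < q.2 := by
    rw [hitems] at hp
    exact fun q hq => (List.pairwise_cons.mp hp).1 q hq
  cases hmin : PySem.List.min? m.keys (fun k' => m.getD k' 0) with
  | none =>
      rw [PySem.List.min?_eq_none_iff] at hmin
      rw [hkeys] at hmin; exact absurd hmin (by simp)
  | some m0 =>
      have hm0mem := PySem.List.min?_mem hmin
      have hm0min := PySem.List.min?_isMin hmin k hkmem
      rw [hkeys] at hm0mem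
      rcases List.mem_cons.mp hm0mem with h1 | h1
      · rw [h1]
      · obtain ⟨q, hqt, hq1⟩ := List.mem_map.mp h1
        have hqitems : (m0, q.2) ∈ m.items := by
          rw [hitems]
          exact List.mem_cons_of_mem _ (by rw [← hq1]; exact hqt)
        have hgm0 : m.getD m0 0 = q.2 := PySem.Dict.getD_of_mem_items m hqitems hn 0
        rw [hgm0, hgk] at hm0min
        exact absurd hm0min (not_le.mpr (hvlt q hqt))

theorem pv_loop_decided : ∀ (parts : List String) (j : Int) (m : PySem.Dict String Int),
    pvInv m j → m.items ≠ [] →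
    pvInv ((PySem.List.enumerate parts j).foldl (fun m ip => pvInner m ip.1 ip.2) m)
        (j + parts.length) ∧
      ((PySem.List.enumerate parts j).foldl (fun m ip => pvInner m ip.1 ip.2) m).items.head?
        = m.items.head? := by
  intro parts
  induction parts with
  | nil =>
      intro j m h _
      rw [PySem.List.enumerate_nil]
      exact ⟨by simpa using h, rfl⟩
  | cons p rest ih =>
      intro j m h hne
      rw [PySem.List.enumerate_cons, List.foldl_cons]
      obtain ⟨h1, hhead⟩ := pvInner_inv m j p h
      have hhead' := hhead hne
      have hne1 : (pvInner m j p).items ≠ [] := by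
        intro hnil
        cases hx : m.items with
        | nil => exact hne hx
        | cons a tl => rw [hnil, hx] at hhead'; simp at hhead'
      obtain ⟨h2, h3⟩ := ih (j + 1) (pvInner m j p) h1 hne1
      constructor
      · have : j + 1 + (rest.length : Int) = j + ((p :: rest).length : Int) := by
          simp; omega
        rwa [this] at h2
      · rw [h3, hhead']

theorem pv_main : ∀ (parts : List String) (j : Int),
    pvFinish ((PySem.List.enumerate parts j).foldl (fun m ip => pvInner m ip.1 ip.2)
      PySem.Dict.empty) = pvScan parts := by
  intro parts
  induction parts with
  | nil => intro j; rfl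
  | cons p rest ih =>
      intro j
      rw [PySem.List.enumerate_cons, List.foldl_cons]
      cases hq : pvTable.get? p with
      | none =>
          have hm1 : pvInner PySem.Dict.empty j p = PySem.Dict.empty := by
            rw [pvInner_char, hq]
          have hcp : pvTable.contains p = false := by
            rw [PySem.Dict.contains_eq_isSome_get?, hq]; rfl
          rw [hm1, ih (j + 1)]
          simp [pvScan, hcp]
      | some s =>
          have hm1 : pvInner PySem.Dict.empty j p = PySem.Dict.empty.insert s j := by
            rw [pvInner_char, hq]; simp
          have hitems1 : (PySem.Dict.empty.insert s j).items = [(s, j)] := by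
            have := PySem.Dict.items_insert_of_not_contains
              (PySem.Dict.empty : PySem.Dict String Int) j
              (k := s) (PySem.Dict.contains_empty s)
            simpa using this
          have hinv1 : pvInv (PySem.Dict.empty.insert s j) (j + 1) := by
            refine ⟨?_, ?_, ?_⟩
            · simp [PySem.Dict.keys, hitems1]
            · rw [hitems1]; exact List.pairwise_singleton _ _
            · intro q hq'; rw [hitems1, List.mem_singleton] at hq'; subst hq'; omega
          obtain ⟨⟨hnd, hpw, _⟩, hhead⟩ := pv_loop_decided rest (j + 1)
            (PySem.Dict.empty.insert s j) hinv1 (by rw [hitems1]; simp)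
          rw [hitems1] at hhead
          set mf := (PySem.List.enumerate rest (j + 1)).foldl
            (fun m ip => pvInner m ip.1 ip.2) (PySem.Dict.empty.insert s j) with hmf
          have hcp : pvTable.contains p = true := by
            rw [PySem.Dict.contains_eq_isSome_get?, hq]; rfl
          have hgp : pvTable.getD p "" = s := PySem.Dict.getD_of_get?_eq_some pvTable "" hq
          cases hx : mf.items with
          | nil => rw [hx] at hhead; simp at hhead
          | cons a tl =>
              rw [hx] at hhead
              simp at hhead
              rw [hm1]
              have : a = (s, j) := hhead
              subst this
              unfold pvFinish
              rw [pv_min_head mf s j tl hnd hpw hx]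
              simp [pvScan, hcp, hgp]

-- B-side characterisation: a grouped table flattened to a first-match assoc list
def pvFlat (groups : List (String × List String)) : List (String × String) :=
  groups.flatMap (fun g => g.2.map (fun q => (q, g.1)))

theorem pv_mk_append_group (sup : String) (tail : List (String × String)) :
    ∀ (pats : List String) (p : String),
    (PySem.Dict.mk (pats.map (fun q => (q, sup)) ++ tail)).get? p
      = if p ∈ pats then some sup else (PySem.Dict.mk tail).get? p := by
  intro pats
  induction pats with
  | nil => intro p; simp
  | cons q qs ih =>
      intro p
      rw [List.map_cons, List.cons_append, PySem.Dict.get?_mk_cons, ih]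
      by_cases h : p = q
      · simp [h]
      · have hb : (q == p) = false := by simp [Ne.symm h]
        simp [hb, h]

theorem pv_lookup_flat : ∀ (groups : List (String × List String)) (p : String),
    pvGroupLookup groups p = (PySem.Dict.mk (pvFlat groups)).get? p := by
  intro groups
  induction groups with
  | nil => intro p; rfl
  | cons g rest ih =>
      intro p
      show (if p ∈ g.2 then some g.1 else pvGroupLookup rest p) = _
      rw [show pvFlat (g :: rest) = g.2.map (fun q => (q, g.1)) ++ pvFlat rest from rfl,
          pv_mk_append_group, ih]

-- lookup in a dict with distinct keys only depends on the set of items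
theorem pv_get?_perm (d d' : PySem.Dict String String)
    (hperm : d.items.Perm d'.items) (hnd : d.keys.Nodup) (p : String) :
    d.get? p = d'.get? p := by
  have hkeys : d.keys = d.items.map Prod.fst := by simp [PySem.Dict.keys]
  have hkeys' : d'.keys = d'.items.map Prod.fst := by simp [PySem.Dict.keys]
  have hnd' : d'.keys.Nodup := by
    rw [hkeys']
    exact ((hperm.map Prod.fst).nodup_iff).mp (hkeys ▸ hnd)
  cases h : d.get? p with
  | some v =>
      have hmem : (p, v) ∈ d.items := PySem.Dict.mem_items_of_get?_eq_some d h
      exact ((PySem.Dict.get?_eq_some_iff_mem_items d' p v hnd').mpr (hperm.mem_iff.mp hmem)).symm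
  | none =>
      rw [PySem.Dict.get?_eq_none_iff_not_mem_keys] at h
      symm
      rw [PySem.Dict.get?_eq_none_iff_not_mem_keys, hkeys']
      intro hc
      exact h (by
        rw [hkeys]
        exact ((hperm.map Prod.fst).mem_iff).mpr hc)

theorem pv_lookup_free (p : String) : pvGroupLookup pvFreeGroups p = pvFree.get? p := by
  rw [pv_lookup_flat]
  exact pv_get?_perm (PySem.Dict.mk (pvFlat pvFreeGroups)) pvFree (by decide) (by decide) p

theorem pv_lookup_paid (p : String) : pvGroupLookup pvPaidGroups p = pvTable.get? p := by
  rw [pv_lookup_flat]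
  rfl

theorem pv_findSome_scan : ∀ (parts : List String),
    (match parts.findSome? (fun part => pvGroupLookup pvPaidGroups part) with
     | some supplier => supplier
     | none => "Неизвестно") = pvScan parts := by
  intro parts
  induction parts with
  | nil => rfl
  | cons p rest ih =>
      rw [List.findSome?_cons]
      cases hq : pvTable.get? p with
      | none =>
          have hcp : pvTable.contains p = false := by
            rw [PySem.Dict.contains_eq_isSome_get?, hq]; rfl
          rw [pv_lookup_paid p, hq, ih]
          simp [pvScan, hcp]
      | some s =>
          have hcp : pvTable.contains p = true := by
            rw [PySem.Dict.contains_eq_isSome_get?, hq]; rfl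
          have hgp : pvTable.getD p "" = s := PySem.Dict.getD_of_get?_eq_some pvTable "" hq
          rw [pv_lookup_paid p, hq]
          simp [pvScan, hcp, hgp]

-- ===== VERDICT (by name: the statement is the Claim_ definition above) =====
theorem determine_supplier_spec : Claim_equal_determine_supplier := by
  intro parts _
  unfold Spec_determine_supplier determine_supplier determine_supplier_alt
  rw [pv_lookup_free ((parts.getLast?).getD "")]
  cases hq : pvFree.get? ((parts.getLast?).getD "") with
  | some f =>
      have hc : pvFree.contains ((parts.getLast?).getD "") = true := by
        rw [PySem.Dict.contains_eq_isSome_get?, hq]; rfl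
      simp [hc, PySem.Dict.getD_of_get?_eq_some pvFree "" hq]
  | none =>
      have hc : pvFree.contains ((parts.getLast?).getD "") = false := by
        rw [PySem.Dict.contains_eq_isSome_get?, hq]; rfl
      simp only [hc, if_false, Bool.false_eq_true]
      rw [pv_main parts 0, ← pv_findSome_scan parts]
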